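-- pv_equiv track=rewrite | github.com/svinkapeppa/MIPT_ALGEBRA_ALGO | task_7/tutte.py | get_face_coordinates
-- ===== SOURCE A (Python) =====
-- def get_face_coordinates(links, num_vertices):
--     coordinates = {}
--
--     vertex = 0
--     center = (num_vertices - 1) // 2
--
--     for i in range(num_vertices):
--         x = i - center
--         coordinates[vertex] = [x, x ** 2]
--
--         if i == num_vertices - 1:
--             break
--
--         idx = 0
--         while True:
--             if links[vertex][idx] not in coordinates and links[vertex][idx] < num_vertices:
--                 vertex = links[vertex][idx]
--                 break
--             idx += 1
--
--     return coordinates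
-- ===== SOURCE B (Python) =====
-- def get_face_coordinates(links, num_vertices):
--     # Recursive decomposition: walk(vertex, i, visited) returns the remaining
--     # (vertex, [x, x**2]) items BACK TO FRONT, threading an immutable frozenset;
--     # the dict is built once at the end from the reversed item list.
--     if num_vertices <= 0:
--         return {}
--     center = (num_vertices - 1) // 2
--
--     def walk(vertex, i, visited):
--         x = i - center
--         if i == num_vertices - 1:
--             return [(vertex, [x, x * x])]
--         visited = visited | {vertex}
--         for v in links[vertex]:
--             if v not in visited and v < num_vertices:
--                 return walk(v, i + 1, visited) + [(vertex, [x, x * x])]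
--
--     return dict(reversed(walk(0, 0, frozenset())))
-- ===== Notes on version B (the rewrite author's own statement) =====
-- stated objective: alternative
-- what changed: A is an iterative loop that mutates one dict which doubles as the visited structure; B is a recursive function that threads an immutable frozenset, returns the (vertex, coords) item list BACK TO FRONT (tail first, current item appended after the recursive call), and builds the dict once at the end from the reversed item list.
import Mathlib
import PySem

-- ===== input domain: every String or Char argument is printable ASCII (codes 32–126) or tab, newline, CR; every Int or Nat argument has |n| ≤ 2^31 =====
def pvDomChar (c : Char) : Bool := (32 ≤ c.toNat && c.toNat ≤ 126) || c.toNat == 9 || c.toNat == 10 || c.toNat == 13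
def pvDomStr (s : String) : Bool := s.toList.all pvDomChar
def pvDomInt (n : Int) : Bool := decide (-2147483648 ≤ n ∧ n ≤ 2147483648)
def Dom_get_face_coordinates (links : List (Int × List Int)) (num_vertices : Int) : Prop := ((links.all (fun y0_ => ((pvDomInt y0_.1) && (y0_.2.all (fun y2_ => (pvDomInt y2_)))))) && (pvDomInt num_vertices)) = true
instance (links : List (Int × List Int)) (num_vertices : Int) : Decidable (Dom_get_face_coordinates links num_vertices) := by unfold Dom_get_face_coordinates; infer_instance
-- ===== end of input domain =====

-- B replaces A's iterative loop (one mutated dict doubling as the visited structure) by a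
-- recursive function threading an immutable set and returning the item list back to front,
-- with the dict built once at the end; same values, no speed claim.

-- ===== PORT A =====
-- inner 'while True' of A: scan links[vertex] from idx = 0 for the first neighbour
-- not yet in coordinates and < num_vertices; none = Python raises IndexError
def gfcScanA (coords : PySem.Dict Int (List Int)) (nv : Int) : List Int → Option Int
  | [] => none
  | a :: rest =>
    if !coords.contains a && a < nv then some a else gfcScanA coords nv rest

-- the 'for i in range(num_vertices)' loop of A over the remaining range list
def gfcLoopA (links : PySem.Dict Int (List Int)) (nv center : Int) :
    List Int → PySem.Dict Int (List Int) → Int → PySem.Dict Int (List Int)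
  | [], coords, _ => coords
  | i :: rest, coords, vertex =>
    let x := i - center
    let coords' := coords.insert vertex [x, x ^ 2]
    if i = nv - 1 then coords'
    else
      match links.get? vertex with
      | none => coords'            -- Python raises KeyError here (outside Pre_)
      | some adj =>
        match gfcScanA coords' nv adj with
        | none => coords'          -- Python raises IndexError here (outside Pre_)
        | some v => gfcLoopA links nv center rest coords' v

def get_face_coordinates (links : List (Int × List Int)) (num_vertices : Int) : List (Int × List Int) :=
  let center := PySem.Int.floordiv (num_vertices - 1) 2
  (gfcLoopA (PySem.Dict.mk links) num_vertices center
      (PySem.List.pyRange 0 num_vertices 1) PySem.Dict.empty 0).items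

-- ===== PORT B =====
-- B's recursive walk(vertex, i, visited): the items from position i onward, BACK TO FRONT
-- (the current item is appended AFTER the recursive call). The fuel argument only totalises
-- the recursion: at every call fuel = (num_vertices - 1 - i).toNat, so the 0 / i ≠ nv-1
-- branch is never taken. none = Python raises (KeyError / 'None + list' TypeError).
def gfcWalkB (links : PySem.Dict Int (List Int)) (nv center : Int) :
    Nat → Int → Int → PySem.Set Int → Option (List (Int × List Int))
  | fuel, vertex, i, visited =>
    let x := i - center
    if i = nv - 1 then some [(vertex, [x, x * x])]
    else
      match fuel with
      | 0 => none
      | k + 1 =>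
        let visited' := visited.add vertex
        match links.get? vertex with
        | none => none
        | some adj =>
          match adj.find? (fun v => !visited'.contains v && v < nv) with
          | none => none
          | some v => (gfcWalkB links nv center k v (i + 1) visited').map (· ++ [(vertex, [x, x * x])])

def get_face_coordinates_alt (links : List (Int × List Int)) (num_vertices : Int) : List (Int × List Int) :=
  if num_vertices ≤ 0 then []
  else
    let center := PySem.Int.floordiv (num_vertices - 1) 2
    match gfcWalkB (PySem.Dict.mk links) num_vertices center (num_vertices - 1).toNat 0 0 PySem.Set.empty with
    | none => []                       -- Python raises here (outside Pre_)
    | some items => (PySem.Dict.ofList items.reverse).items   -- dict(reversed(items))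

-- ===== PRECONDITION & SPEC =====
-- whether the greedy walk can still take k further steps from v with 'seen' already visited
def pvWalkable (links : List (Int × List Int)) (nv : Int) : Nat → List Int → Int → Bool
  | 0, _, _ => true
  | k + 1, seen, v =>
    (((links.find? (·.1 == v)).map Prod.snd).bind
        (List.find? (fun u => decide (u ∉ seen) && decide (u < nv)))).elim
      false (fun u => pvWalkable links nv k (u :: seen) u)

-- exactly the inputs where A returns: either the loop needs no neighbour search
-- (num_vertices ≤ 1) or the greedy walk from 0 completes its num_vertices - 1 steps
def Pre_get_face_coordinates (links : List (Int × List Int)) (num_vertices : Int) : Prop :=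
  num_vertices ≤ 1 ∨ pvWalkable links num_vertices (num_vertices - 1).toNat [0] 0 = true
instance (links : List (Int × List Int)) (num_vertices : Int) : Decidable (Pre_get_face_coordinates links num_vertices) := by unfold Pre_get_face_coordinates; infer_instance

def pvWitness_get_face_coordinates : (List (Int × List Int)) × Int := ([(0, [1]), (1, [0])], 2)

def Spec_get_face_coordinates (links : List (Int × List Int)) (num_vertices : Int) (out : List (Int × List Int)) : Prop := out = get_face_coordinates_alt links num_vertices
instance (links : List (Int × List Int)) (num_vertices : Int) (out : List (Int × List Int)) : Decidable (Spec_get_face_coordinates links num_vertices out) := by unfold Spec_get_face_coordinates; infer_instance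

-- ===== CLAIM (what is proved, stated in full; the proofs are below) =====
def Claim_equal_get_face_coordinates : Prop := ∀ (links : List (Int × List Int)) (num_vertices : Int), Dom_get_face_coordinates links num_vertices → Pre_get_face_coordinates links num_vertices → Spec_get_face_coordinates links num_vertices (get_face_coordinates links num_vertices)

-- ===== LEMMAS AND PROOFS =====

theorem gfcScanA_eq_find? (coords : PySem.Dict Int (List Int)) (nv : Int)
    (visited : PySem.Set Int) (hk : coords.keys = visited) :
    ∀ adj : List Int,
      gfcScanA coords nv adj = adj.find? (fun v => !visited.contains v && v < nv) := by
  intro adj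
  induction adj with
  | nil => rfl
  | cons a rest ih =>
    simp only [gfcScanA, List.find?]
    have hc : coords.contains a = visited.contains a := by
      rw [PySem.Dict.contains_eq_decide_mem_keys, hk]
      simp [PySem.Set.contains]
    rw [hc, ih]
    cases (!visited.contains a && decide (a < nv)) <;> simp

-- the main simulation: under the loop invariants the A loop's items are the old items
-- followed by the reverse of B's back-to-front item list
theorem gfcLoop_eq_walk (links : List (Int × List Int)) (nv center : Int) :
    ∀ (is : List Int) (i : Int) (k : Nat) (coords : PySem.Dict Int (List Int))
      (visited : PySem.Set Int) (vertex : Int) (seen : List Int),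
      is = PySem.List.pyRange i nv 1 →
      k = (nv - 1 - i).toNat →
      i < nv →
      coords.keys = visited →
      visited.contains vertex = false →
      (∀ u : Int, u ∈ seen ↔ u ∈ visited.add vertex) →
      pvWalkable links nv k seen vertex = true →
      ∃ l, gfcWalkB (PySem.Dict.mk links) nv center k vertex i visited = some l ∧
        (gfcLoopA (PySem.Dict.mk links) nv center is coords vertex).items
          = coords.items ++ l.reverse ∧
        (∀ p ∈ l, visited.contains p.1 = false) ∧
        (l.map Prod.fst).Nodup := by
  intro is
  induction is with
  | nil =>
    intro i k coords visited vertex seen hrange _ hlt _ _ _ _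
    rw [PySem.List.pyRange_one_cons hlt] at hrange
    simp at hrange
  | cons j rest ih =>
    intro i k coords visited vertex seen hrange hk hlt hkeys hvert hseen hwalk
    rw [PySem.List.pyRange_one_cons hlt] at hrange
    obtain ⟨hj, hrest⟩ : j = i ∧ rest = PySem.List.pyRange (i + 1) nv 1 :=
      ⟨(List.cons.injEq ..).mp hrange |>.1, (List.cons.injEq ..).mp hrange |>.2⟩
    have hij : i = j := hj.symm
    subst hij
    have hcont : coords.contains vertex = false := by
      rw [PySem.Dict.contains_eq_decide_mem_keys, hkeys]
      simpa [PySem.Set.contains] using hvert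
    have hmem : vertex ∉ visited := by
      simpa [PySem.Set.contains] using hvert
    have hadd : visited.add vertex = visited ++ [vertex] := by
      simp [PySem.Set.add, hmem, PySem.Set.contains]
    have hitems' : (coords.insert vertex [i - center, (i - center) ^ 2]).items
        = coords.items ++ [(vertex, [i - center, (i - center) ^ 2])] :=
      PySem.Dict.items_insert_of_not_contains _ _ hcont
    have hkeys' : (coords.insert vertex [i - center, (i - center) ^ 2]).keys
        = visited.add vertex := by
      rw [PySem.Dict.keys_insert_of_not_contains _ _ hcont, hkeys, hadd]
    have hsq : (i - center) ^ 2 = (i - center) * (i - center) := sq (i - center)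
    by_cases hlast : i = nv - 1
    · have hk0 : k = 0 := by omega
      subst hk0
      simp only [gfcLoopA, gfcWalkB]
      rw [if_pos hlast, if_pos hlast]
      refine ⟨_, rfl, ?_, ?_, by simp⟩
      · simpa [hsq] using hitems'
      · intro p hp
        simp only [List.mem_singleton] at hp
        subst hp
        exact hvert
    · obtain ⟨k', rfl⟩ : ∃ k', k = k' + 1 := ⟨k - 1, by omega⟩
      simp only [gfcLoopA, gfcWalkB]
      rw [if_neg hlast, if_neg hlast]
      have hwstep := hwalk
      unfold pvWalkable at hwstep
      have hget : (PySem.Dict.mk links).get? vertex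
          = (links.find? (·.1 == vertex)).map Prod.snd := rfl
      cases hadj : links.find? (·.1 == vertex) with
      | none => rw [hadj] at hwstep; simp at hwstep
      | some pr =>
        rw [hadj] at hwstep
        simp only [Option.map_some, Option.bind_some] at hwstep
        have hpred : (fun u => decide (u ∉ seen) && decide (u < nv))
            = (fun u => !(visited.add vertex).contains u && decide (u < nv)) := by
          funext u
          have h := hseen u
          by_cases hu : u ∈ visited.add vertex
          · simp [PySem.Set.contains, hu, h]
          · simp [PySem.Set.contains, hu, h]
        rw [hpred] at hwstep
        cases hfind : pr.2.find? (fun u => !(visited.add vertex).contains u && decide (u < nv)) with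
        | none => rw [hfind] at hwstep; simp at hwstep
        | some v =>
          rw [hfind] at hwstep
          simp only [Option.elim_some] at hwstep
          have hvnotmem : (visited.add vertex).contains v = false := by
            have := List.find?_some hfind
            simp only [Bool.and_eq_true, Bool.not_eq_true'] at this
            exact this.1
          have hseen' : ∀ u : Int, u ∈ (v :: seen) ↔ u ∈ (visited.add vertex).add v := by
            intro u
            have hvadd : (visited.add vertex).add v = (visited.add vertex) ++ [v] := by
              generalize hS : visited.add vertex = S at hvnotmem ⊢
              have hv' : v ∉ S := by simpa [PySem.Set.contains] using hvnotmem
              simp [PySem.Set.add, PySem.Set.contains, hv']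
            rw [hvadd]
            simp only [List.mem_cons, List.mem_append]
            rw [hseen u]
            tauto
          obtain ⟨l, hwB, hA, hfresh, hnd⟩ :=
            ih (i + 1) k' (coords.insert vertex [i - center, (i - center) ^ 2])
              (visited.add vertex) v (v :: seen) (by rw [hrest])
              (by omega) (by omega) hkeys' hvnotmem hseen' hwstep
          rw [hget, hadj]
          simp only [Option.map_some]
          rw [gfcScanA_eq_find? _ nv (visited.add vertex) hkeys' pr.2]
          simp only [hfind, hwB, Option.map_some]
          refine ⟨l ++ [(vertex, [i - center, (i - center) * (i - center)])], rfl, ?_, ?_, ?_⟩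
          · rw [hA, hitems']
            simp [hsq]
          · intro p hp
            rcases List.mem_append.mp hp with h | h
            · have h2 := hfresh p h
              rw [hadd] at h2
              have h3 : p.1 ∉ visited ++ [vertex] := by
                simpa [PySem.Set.contains] using h2
              have h4 : p.1 ∉ visited := fun hm => h3 (List.mem_append.mpr (Or.inl hm))
              simpa [PySem.Set.contains] using h4
            · simp only [List.mem_singleton] at h
              rw [h]
              exact hvert
          · have hvx : vertex ∉ l.map Prod.fst := by
              intro ha
              obtain ⟨p, hp, hfst⟩ := List.mem_map.mp ha
              have h2 := hfresh p hp
              rw [hadd] at h2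
              have h3 : p.1 ∈ visited ++ [vertex] :=
                List.mem_append.mpr (Or.inr (by simp [hfst]))
              have h4 : PySem.Set.contains (visited ++ [vertex]) p.1 = true := by
                simpa [PySem.Set.contains] using h3
              rw [h4] at h2
              simp at h2
            rw [List.map_append]
            simp only [List.map_cons, List.map_nil]
            simp [List.nodup_append, hnd]
            intro a x hax ha
            exact hvx (ha ▸ List.mem_map.mpr ⟨(a, x), hax, rfl⟩)

theorem dict_ofList_items_of_nodup (l : List (Int × List Int))
    (h : (l.map Prod.fst).Nodup) : (PySem.Dict.ofList l).items = l := by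
  unfold PySem.Dict.ofList PySem.Dict.update
  rw [PySem.Dict.items_foldl_insert_fresh]
  · simp [PySem.Dict.empty]
  · intro a _; exact PySem.Dict.contains_empty _
  · simpa using h

-- ===== VERDICT (by name: the statement is the Claim_ definition above) =====
theorem get_face_coordinates_spec : Claim_equal_get_face_coordinates := by
  intro links nv _ hpre
  unfold Spec_get_face_coordinates get_face_coordinates get_face_coordinates_alt
  by_cases hpos : nv ≤ 0
  · rw [if_pos hpos, PySem.List.pyRange_one_eq_nil (by omega)]
    rfl
  · rw [if_neg hpos]
    have hwalk : pvWalkable links nv (nv - 1).toNat [0] 0 = true := by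
      rcases hpre with h | h
      · have : nv = 1 := by omega
        subst this
        rfl
      · exact h
    obtain ⟨l, hwB, hA, _, hnd⟩ :=
      gfcLoop_eq_walk links nv (PySem.Int.floordiv (nv - 1) 2)
        (PySem.List.pyRange 0 nv 1) 0 (nv - 1).toNat PySem.Dict.empty
        PySem.Set.empty 0 [0] rfl (by norm_num) (by omega) rfl rfl
        (by intro u; simp [PySem.Set.add, PySem.Set.empty, PySem.Set.contains]) hwalk
    simp only [hwB, hA]
    rw [dict_ofList_items_of_nodup l.reverse (by rw [List.map_reverse]; exact List.nodup_reverse.mpr hnd)]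
    simp [PySem.Dict.empty]
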